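-- pv_equiv track=rewrite | github.com/msullivan/nanochat | tasks/arithmetic.py | _multiplication_work
-- ===== SOURCE A (Python) =====
-- def _multiplication_work(a, b):
--     """
--     Shown-work string for a * b. Small enough → direct one-liner.
--     Otherwise break the larger operand by place value and sum the partial products.
--     """
--     product = a * b
--     if min(a, b) < 10 or max(a, b) < 30:
--         return f"{a} × {b} = {product}\n\n#### {product}"
--     # Break the larger operand by place value; multiply by the smaller.
--     if a >= b:
--         to_break, mul, break_on_left = a, b, True
--     else:
--         to_break, mul, break_on_left = b, a, False
--     digits = str(to_break)
--     n = len(digits)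
--     parts, partial_values = [], []
--     for i, d in enumerate(digits):
--         dv = int(d)
--         if dv == 0:
--             continue
--         coeff = dv * (10 ** (n - 1 - i))
--         partial_values.append(mul * coeff)
--         if break_on_left:
--             parts.append(f"{coeff} × {mul}")
--         else:
--             parts.append(f"{mul} × {coeff}")
--     if len(parts) <= 1:
--         return f"{a} × {b} = {product}\n\n#### {product}"
--     lines = [
--         f"{a} × {b}",
--         "= " + " + ".join(parts),
--         "= " + " + ".join(str(p) for p in partial_values),
--     ]
--     current = list(partial_values)
--     while len(current) > 1:
--         head = current[0] + current[1]
--         current = [head] + current[2:]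
--         lines.append("= " + " + ".join(str(n) for n in current))
--     return "\n".join(lines) + f"\n\n#### {product}"
-- ===== SOURCE B (Python) =====
-- def _multiplication_work(a, b):
--     """Same shown-work string, computed arithmetically: place values extracted
--     by repeated divmod on the number itself (no digit-string scan), and the
--     folding lines emitted from a precomputed prefix-sum table with suffix
--     slices instead of rebuilding a shrinking list in a while loop."""
--     product = a * b
--     if min(a, b) < 10 or max(a, b) < 30:
--         return f"{a} × {b} = {product}\n\n#### {product}"
--     big, small = (a, b) if a >= b else (b, a)
--     # nonzero place values of big, least significant first, then reversed
--     coeffs = []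
--     rem, p = big, 1
--     while rem:
--         rem, d = divmod(rem, 10)
--         if d:
--             coeffs.append(d * p)
--         p *= 10
--     coeffs.reverse()
--     if len(coeffs) <= 1:
--         return f"{a} × {b} = {product}\n\n#### {product}"
--     vals = [small * c for c in coeffs]
--     sums = []
--     s = 0
--     for v in vals:
--         s += v
--         sums.append(s)
--     terms = ([f"{c} × {small}" for c in coeffs] if a >= b
--              else [f"{small} × {c}" for c in coeffs])
--     lines = [f"{a} × {b}",
--              "= " + " + ".join(terms),
--              "= " + " + ".join(map(str, vals))]
--     lines += ["= " + " + ".join(map(str, [sums[j + 1]] + vals[j + 2:]))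
--               for j in range(len(vals) - 1)]
--     return "\n".join(lines) + f"\n\n#### {product}"
-- ===== Notes on version B (the rewrite author's own statement) =====
-- stated objective: alternative
-- what changed: B extracts the place-value coefficients arithmetically by repeated divmod on the number itself instead of enumerating the digits of str(big), and emits the folding lines from a precomputed prefix-sum table indexed with suffix slices instead of A's while loop that repeatedly rebuilds a shrinking list.
import Mathlib
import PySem

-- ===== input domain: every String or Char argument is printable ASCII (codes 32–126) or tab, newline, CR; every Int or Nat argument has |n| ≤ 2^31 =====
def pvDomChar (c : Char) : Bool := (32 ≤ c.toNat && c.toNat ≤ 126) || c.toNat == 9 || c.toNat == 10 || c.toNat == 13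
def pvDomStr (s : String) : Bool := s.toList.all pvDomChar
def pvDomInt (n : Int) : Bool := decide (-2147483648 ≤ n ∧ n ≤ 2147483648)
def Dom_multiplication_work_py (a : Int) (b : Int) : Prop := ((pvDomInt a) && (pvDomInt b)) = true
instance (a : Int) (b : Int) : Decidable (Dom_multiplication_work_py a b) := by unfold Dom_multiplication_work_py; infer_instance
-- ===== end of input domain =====

-- B computes the place values arithmetically by repeated divmod on the number itself instead of
-- scanning the digit string, and emits the folding lines from a precomputed prefix-sum table with
-- suffix slices instead of rebuilding a shrinking list in a while loop (objective: alternative).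

-- ===== PORT A =====
-- A's while loop: current = [current[0]+current[1]] + current[2:], appending a re-joined line each step
def aWhile (lines : List String) (current : List Int) : List String :=
  match current with
  | x :: y :: rest =>
      aWhile (lines ++ ["= " ++ PySem.Str.join " + " (((x + y) :: rest).map PySem.Int.toStr)])
        ((x + y) :: rest)
  | _ => lines
termination_by current.length

-- A's for-loop body over enumerate(digits): skip '0' digits, append a term string and a partial value
def aStep (mul : Int) (break_on_left : Bool) (n : Nat)
    (acc : List String × List Int) (p : Int × Char) : List String × List Int :=
  -- int(d): exact here, d is a decimal digit char produced by str() of a nonnegative int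
  let dv : Int := (p.2.toNat : Int) - 48
  if dv = 0 then acc
  else
    -- 10 ** (n - 1 - i): i < n on every element of enumerate(digits), so Nat subtraction is exact
    let coeff : Int := dv * (10 : Int) ^ (n - 1 - p.1.toNat)
    (acc.1 ++ [if break_on_left then PySem.Int.toStr coeff ++ " × " ++ PySem.Int.toStr mul
               else PySem.Int.toStr mul ++ " × " ++ PySem.Int.toStr coeff],
     acc.2 ++ [mul * coeff])

def multiplication_work_py (a : Int) (b : Int) : String :=
  let product := a * b
  if min a b < 10 ∨ max a b < 30 then
    PySem.Int.toStr a ++ " × " ++ PySem.Int.toStr b ++ " = " ++ PySem.Int.toStr product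
      ++ "\n\n#### " ++ PySem.Int.toStr product
  else
    let tmb := if a ≥ b then (a, b, true) else (b, a, false)
    let to_break := tmb.1
    let mul := tmb.2.1
    let break_on_left := tmb.2.2
    let digits := (PySem.Int.toStr to_break).toList
    let n := digits.length
    let pp := (PySem.List.enumerate digits 0).foldl (aStep mul break_on_left n) ([], [])
    let parts := pp.1
    let partial_values := pp.2
    if parts.length ≤ 1 then
      PySem.Int.toStr a ++ " × " ++ PySem.Int.toStr b ++ " = " ++ PySem.Int.toStr product
        ++ "\n\n#### " ++ PySem.Int.toStr product
    else
      let lines := [PySem.Int.toStr a ++ " × " ++ PySem.Int.toStr b,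
                    "= " ++ PySem.Str.join " + " parts,
                    "= " ++ PySem.Str.join " + " (partial_values.map PySem.Int.toStr)]
      PySem.Str.join "\n" (aWhile lines partial_values) ++ "\n\n#### " ++ PySem.Int.toStr product

-- ===== PORT B =====
-- B's divmod loop: nonzero place values of rem, least significant first.
-- Python's loop is entered only with rem = big > 0 and exits at rem = 0;
-- the rem ≤ 0 guard only makes the recursion total (it covers the loop's exit test rem = 0).
def bExtract (rem : Int) (p : Int) : List Int :=
  if rem ≤ 0 then []
  else
    (if PySem.Int.mod rem 10 = 0 then [] else [PySem.Int.mod rem 10 * p]) ++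
      bExtract (PySem.Int.floordiv rem 10) (p * 10)
termination_by rem.toNat
decreasing_by
  rename_i h
  have h10 : PySem.Int.floordiv rem 10 = rem / 10 := by
    simp only [PySem.Int.floordiv]
    rw [Int.fdiv_eq_ediv]
    simp
  rw [h10]
  omega

def multiplication_work_py_alt (a : Int) (b : Int) : String :=
  let product := a * b
  let oneliner := PySem.Int.toStr a ++ " × " ++ PySem.Int.toStr b ++ " = " ++ PySem.Int.toStr product
      ++ "\n\n#### " ++ PySem.Int.toStr product
  if min a b < 10 ∨ max a b < 30 then oneliner
  else
    let big := if a ≥ b then a else b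
    let small := if a ≥ b then b else a
    let coeffs := (bExtract big 1).reverse
    if coeffs.length ≤ 1 then oneliner
    else
      let vals := coeffs.map (fun c => small * c)
      -- s = 0; for v in vals: s += v; sums.append(s)
      let sums := (vals.foldl (fun acc v => (acc.1 + v, acc.2 ++ [acc.1 + v])) (0, ([] : List Int))).2
      let terms := if a ≥ b then
          coeffs.map (fun c => PySem.Int.toStr c ++ " × " ++ PySem.Int.toStr small)
        else
          coeffs.map (fun c => PySem.Int.toStr small ++ " × " ++ PySem.Int.toStr c)
      let lines := [PySem.Int.toStr a ++ " × " ++ PySem.Int.toStr b,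
                    "= " ++ PySem.Str.join " + " terms,
                    "= " ++ PySem.Str.join " + " (vals.map PySem.Int.toStr)]
      -- ["= " + " + ".join(map(str, [sums[j+1]] + vals[j+2:])) for j in range(len(vals) - 1)]
      let lines := lines ++ (PySem.List.pyRange 0 (PySem.List.len vals - 1) 1).map (fun j =>
          "= " ++ PySem.Str.join " + "
            ((PySem.List.pyGetD sums (j + 1) 0 :: PySem.List.slice vals (some (j + 2)) none).map
              PySem.Int.toStr))
      PySem.Str.join "\n" lines ++ "\n\n#### " ++ PySem.Int.toStr product

-- ===== PRECONDITION & SPEC =====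
def Spec_multiplication_work_py (a : Int) (b : Int) (out : String) : Prop := out = multiplication_work_py_alt a b
instance (a : Int) (b : Int) (out : String) : Decidable (Spec_multiplication_work_py a b out) := by unfold Spec_multiplication_work_py; infer_instance

-- ===== CLAIM =====
def Claim_equal_multiplication_work_py : Prop := ∀ (a : Int) (b : Int), Dom_multiplication_work_py a b → Spec_multiplication_work_py a b (multiplication_work_py a b)

-- ===== LEMMAS AND PROOFS =====

theorem char_eq_zero_iff (c : Char) : ((c.toNat : Int) - 48 = 0) ↔ c = '0' := by
  constructor
  · intro h
    apply Char.ext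
    apply UInt32.toNat_inj.mp
    have : c.toNat = 48 := by omega
    simpa using this
  · intro h; subst h; decide

theorem aStep_foldl (mul : Int) (bol : Bool) (n : Nat) (l : List (Int × Char)) :
    ∀ (xs : List String) (ys : List Int),
    l.foldl (aStep mul bol n) (xs, ys)
      = (xs ++ (((l.filter (fun p => p.2 != '0')).map
            (fun p => ((p.2.toNat : Int) - 48) * (10 : Int) ^ (n - 1 - p.1.toNat))).map
            (fun c => if bol then PySem.Int.toStr c ++ " × " ++ PySem.Int.toStr mul
                      else PySem.Int.toStr mul ++ " × " ++ PySem.Int.toStr c)),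
         ys ++ (((l.filter (fun p => p.2 != '0')).map
            (fun p => ((p.2.toNat : Int) - 48) * (10 : Int) ^ (n - 1 - p.1.toNat))).map
            (fun c => mul * c))) := by
  induction l with
  | nil => intro xs ys; simp
  | cons q l ih =>
    intro xs ys
    rw [List.foldl_cons]
    by_cases hq : q.2 = '0'
    · have hdv : ((q.2.toNat : Int) - 48 = 0) := (char_eq_zero_iff q.2).mpr hq
      have : aStep mul bol n (xs, ys) q = (xs, ys) := by
        simp [aStep, hdv]
      rw [this, ih]
      simp [hq]
    · have hdv : ¬ ((q.2.toNat : Int) - 48 = 0) := fun h => hq ((char_eq_zero_iff q.2).mp h)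
      have : aStep mul bol n (xs, ys) q
          = (xs ++ [if bol then PySem.Int.toStr (((q.2.toNat : Int) - 48) * (10 : Int) ^ (n - 1 - q.1.toNat)) ++ " × " ++ PySem.Int.toStr mul
                    else PySem.Int.toStr mul ++ " × " ++ PySem.Int.toStr (((q.2.toNat : Int) - 48) * (10 : Int) ^ (n - 1 - q.1.toNat))],
             ys ++ [mul * (((q.2.toNat : Int) - 48) * (10 : Int) ^ (n - 1 - q.1.toNat))]) := by
        simp [aStep, hdv]
      rw [this, ih]
      simp [hq]

-- ---- digit-string vs divmod extraction ----

theorem tdc_eq (f : Nat) : ∀ (n : Nat) (l : List Char), 0 < n → n ≤ f →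
    Nat.toDigitsCore 10 f n l = ((Nat.digits 10 n).map Nat.digitChar).reverse ++ l := by
  induction f with
  | zero => intro n l h hf; omega
  | succ f ih =>
    intro n l h hf
    rw [Nat.toDigitsCore]
    by_cases hq : n / 10 = 0
    · rw [if_pos hq]
      rw [Nat.digits_def' (by norm_num) h, hq]
      simp
    · rw [if_neg hq]
      rw [ih (n / 10) _ (Nat.pos_of_ne_zero hq) (by omega)]
      rw [Nat.digits_def' (by norm_num) h]
      simp

theorem toChars_pos (m : Nat) (h : 0 < m) :
    PySem.Int.toChars (m : Int) = ((Nat.digits 10 m).map Nat.digitChar).reverse := by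
  unfold PySem.Int.toChars
  rw [if_neg (by omega)]
  simp only [Int.toNat_natCast]
  unfold Nat.toDigits
  rw [tdc_eq (m + 1) m [] h (by omega)]
  simp

-- big-endian nonzero place values of a digit list, scaled by p
def beCoeffs (ds : List Nat) (p : Int) : List Int :=
  match ds with
  | [] => []
  | d :: tl => (if d = 0 then [] else [(d : Int) * (p * (10 : Int) ^ tl.length)]) ++ beCoeffs tl p

-- little-endian form, as B's divmod loop produces it
def leCoeffs (ds : List Nat) (p : Int) : List Int :=
  match ds with
  | [] => []
  | d :: tl => (if d = 0 then [] else [(d : Int) * p]) ++ leCoeffs tl (p * 10)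

theorem beCoeffs_append_singleton (ds : List Nat) (d : Nat) (p : Int) :
    beCoeffs (ds ++ [d]) p = beCoeffs ds (p * 10) ++ (if d = 0 then [] else [(d : Int) * p]) := by
  induction ds generalizing p with
  | nil => simp [beCoeffs]
  | cons e tl ih =>
    by_cases he : e = 0
    · simp [beCoeffs, he, ih]
    · simp only [List.cons_append, beCoeffs, if_neg he, ih, List.length_append,
        List.length_cons, List.length_nil, List.append_assoc]
      congr 1
      congr 1
      ring

theorem leCoeffs_reverse (ds : List Nat) (p : Int) :
    (leCoeffs ds p).reverse = beCoeffs ds.reverse p := by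
  induction ds generalizing p with
  | nil => simp [leCoeffs, beCoeffs]
  | cons d tl ih =>
    simp only [leCoeffs, List.reverse_append, List.reverse_cons]
    rw [beCoeffs_append_singleton, ← ih]
    cases Decidable.em (d = 0) with
    | inl h => simp [h]
    | inr h => simp [h]

theorem bExtract_eq (m : Nat) (h : 0 < m) : ∀ p, bExtract (m : Int) p = leCoeffs (Nat.digits 10 m) p := by
  induction m using Nat.strong_induction_on with
  | _ m ih =>
    intro p
    rw [bExtract, if_neg (by omega)]
    rw [Nat.digits_def' (by norm_num) h]
    have hmod : PySem.Int.mod (m : Int) 10 = ((m % 10 : Nat) : Int) := by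
      exact_mod_cast PySem.Int.mod_natCast m 10
    have hdiv : PySem.Int.floordiv (m : Int) 10 = ((m / 10 : Nat) : Int) := by
      exact_mod_cast PySem.Int.floordiv_natCast m 10
    rw [hmod, hdiv]
    simp only [leCoeffs]
    congr 1
    · split_ifs with h1 h2 h2
      · rfl
      · exact absurd (by exact_mod_cast h1) h2
      · exact absurd (by exact_mod_cast h2) h1
      · rfl
    · by_cases hq : m / 10 = 0
      · rw [hq]
        simp [bExtract, leCoeffs]
      · exact ih (m / 10) (by omega) (Nat.pos_of_ne_zero hq) (p * 10)

theorem digitChar_ne_zero_iff (d : Nat) (h : d < 10) : (Nat.digitChar d != '0') = true ↔ d ≠ 0 := by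
  interval_cases d <;> simp <;> decide

theorem digitChar_val (d : Nat) (h : d < 10) : (((Nat.digitChar d).toNat : Int) - 48) = (d : Int) := by
  interval_cases d <;> decide

-- A's enumerate/filter/map pipeline over big-endian digit chars equals beCoeffs
theorem pipeline_eq (ds : List Nat) : ∀ (k n : Nat), (∀ d ∈ ds, d < 10) → n = k + ds.length →
    ((PySem.List.enumerate (ds.map Nat.digitChar) (k : Int)).filter (fun p => p.2 != '0')).map
      (fun p => ((p.2.toNat : Int) - 48) * (10 : Int) ^ (n - 1 - p.1.toNat)) = beCoeffs ds 1 := by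
  induction ds with
  | nil => intro k n _ _; simp [beCoeffs, PySem.List.enumerate_nil]
  | cons d tl ih =>
    intro k n hlt hn
    have hd : d < 10 := hlt d (by simp)
    rw [List.map_cons, PySem.List.enumerate_cons, List.filter_cons]
    have hk1 : ((k : Int) + 1) = (((k + 1 : Nat)) : Int) := by push_cast; ring
    have htl := ih (k + 1) n (fun e he => hlt e (by simp [he])) (by simp at hn ⊢; omega)
    by_cases hz : d = 0
    · subst hz
      simp only [show Nat.digitChar 0 = '0' from rfl]
      rw [if_neg (by simp)]
      rw [hk1, htl]
      simp [beCoeffs]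
    · have h1 : ((((k : Int)), Nat.digitChar d).2 != '0') = true := by
        simpa using (digitChar_ne_zero_iff d hd).mpr hz
      rw [if_pos h1, List.map_cons, hk1, htl]
      simp only [beCoeffs, if_neg hz]
      congr 2
      rw [digitChar_val d hd]
      have he : n - 1 - ((k : Int)).toNat = tl.length := by
        simp only [List.length_cons] at hn
        simp only [Int.toNat_natCast]
        omega
      rw [he]
      ring

-- the combined coefficient bridge, phrased on the exact terms of port A's goal
theorem coeffs_bridge (m : Nat) (h : 0 < m) :
    ((PySem.List.enumerate (PySem.Int.toStr (m : Int)).toList 0).filter (fun p => p.2 != '0')).map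
      (fun p => ((p.2.toNat : Int) - 48) * (10 : Int) ^ ((PySem.Int.toStr (m : Int)).toList.length - 1 - p.1.toNat))
    = (bExtract (m : Int) 1).reverse := by
  rw [bExtract_eq m h 1, leCoeffs_reverse]
  rw [PySem.Int.toList_toStr, toChars_pos m h, ← List.map_reverse]
  have h0 : (0 : Int) = ((0 : Nat) : Int) := rfl
  rw [h0]
  rw [pipeline_eq ((Nat.digits 10 m).reverse) 0
    ((List.map Nat.digitChar (Nat.digits 10 m).reverse).length)
    (fun d hd => Nat.digits_lt_base (by norm_num) (List.mem_reverse.mp hd)) (by simp)]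

-- ---- the folding lines ----

-- the sequence of lines A's while loop appends, as a recursion on the value list
def stepsList (t : Int) (rest : List Int) : List String :=
  match rest with
  | [] => []
  | r :: rest' => ("= " ++ PySem.Str.join " + " (((t + r) :: rest').map PySem.Int.toStr)) :: stepsList (t + r) rest'

theorem aWhile_eq (rest : List Int) : ∀ (lines : List String) (t : Int),
    aWhile lines (t :: rest) = lines ++ stepsList t rest := by
  induction rest with
  | nil =>
    intro lines t
    rw [aWhile]
    simp [stepsList]
    intro x y rest h
    simp at h
  | cons r rest' ih =>
    intro lines t
    rw [aWhile, ih]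
    simp [stepsList]

-- prefix sums with starting value s
def scanAdd (s : Int) (vs : List Int) : List Int :=
  match vs with
  | [] => []
  | v :: tl => (s + v) :: scanAdd (s + v) tl

theorem sums_foldl (vs : List Int) : ∀ (s : Int) (acc : List Int),
    (vs.foldl (fun acc v => (acc.1 + v, acc.2 ++ [acc.1 + v])) (s, acc)).2 = acc ++ scanAdd s vs := by
  induction vs with
  | nil => intro s acc; simp [scanAdd]
  | cons v tl ih =>
    intro s acc
    rw [List.foldl_cons, ih]
    simp [scanAdd]

theorem steps_index (rest : List Int) : ∀ (t : Int),
    (List.range rest.length).map (fun j =>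
      "= " ++ PySem.Str.join " + " (((scanAdd t rest).getD j 0 :: rest.drop (j + 1)).map PySem.Int.toStr))
    = stepsList t rest := by
  induction rest with
  | nil => intro t; simp [stepsList]
  | cons r rest' ih =>
    intro t
    rw [List.length_cons, List.range_succ_eq_map, List.map_cons, List.map_map]
    rw [show stepsList t (r :: rest')
        = ("= " ++ PySem.Str.join " + " (((t + r) :: rest').map PySem.Int.toStr))
          :: stepsList (t + r) rest' from rfl]
    congr 1
    rw [← ih (t + r)]
    apply List.map_congr_left
    intro j _
    simp [scanAdd]

theorem lines_tail_eq (v : Int) (rest : List Int) :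
    (PySem.List.pyRange 0 ((rest.length : Int)) 1).map (fun j =>
      "= " ++ PySem.Str.join " + "
        ((PySem.List.pyGetD (scanAdd 0 (v :: rest)) (j + 1) 0 ::
          PySem.List.slice (v :: rest) (some (j + 2)) none).map PySem.Int.toStr))
    = stepsList v rest := by
  rw [PySem.List.pyRange_one]
  simp only [sub_zero, Int.toNat_natCast, List.map_map]
  rw [← steps_index rest v]
  apply List.map_congr_left
  intro j _
  simp only [Function.comp_apply, zero_add]
  have h1 : ((j : Int) + 1) = (((j + 1 : Nat)) : Int) := by push_cast; ring
  have h2 : ((j : Int) + 2) = (((j + 2 : Nat)) : Int) := by push_cast; ring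
  rw [h1, h2, PySem.List.pyGetD_natCast, PySem.List.slice_from_natCast]
  have h3 : scanAdd 0 (v :: rest) = v :: scanAdd v rest := by simp [scanAdd]
  rw [h3]
  simp

-- assemble one branch (big = the broken operand, mul = the other)
set_option maxHeartbeats 1000000 in
theorem branch_eq (a b big mul : Int) (bol : Bool) (hbig : 0 < big) :
    (let digits := (PySem.Int.toStr big).toList
     let n := digits.length
     let pp := (PySem.List.enumerate digits 0).foldl (aStep mul bol n) ([], [])
     let parts := pp.1
     let partial_values := pp.2
     if parts.length ≤ 1 then
       PySem.Int.toStr a ++ " × " ++ PySem.Int.toStr b ++ " = " ++ PySem.Int.toStr (a * b)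
         ++ "\n\n#### " ++ PySem.Int.toStr (a * b)
     else
       let lines := [PySem.Int.toStr a ++ " × " ++ PySem.Int.toStr b,
                     "= " ++ PySem.Str.join " + " parts,
                     "= " ++ PySem.Str.join " + " (partial_values.map PySem.Int.toStr)]
       PySem.Str.join "\n" (aWhile lines partial_values) ++ "\n\n#### " ++ PySem.Int.toStr (a * b))
    =
    (let coeffs := (bExtract big 1).reverse
     if coeffs.length ≤ 1 then
       PySem.Int.toStr a ++ " × " ++ PySem.Int.toStr b ++ " = " ++ PySem.Int.toStr (a * b)
         ++ "\n\n#### " ++ PySem.Int.toStr (a * b)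
     else
       let vals := coeffs.map (fun c => mul * c)
       let sums := (vals.foldl (fun acc v => (acc.1 + v, acc.2 ++ [acc.1 + v])) (0, ([] : List Int))).2
       let terms := if bol then
           coeffs.map (fun c => PySem.Int.toStr c ++ " × " ++ PySem.Int.toStr mul)
         else
           coeffs.map (fun c => PySem.Int.toStr mul ++ " × " ++ PySem.Int.toStr c)
       let lines := [PySem.Int.toStr a ++ " × " ++ PySem.Int.toStr b,
                     "= " ++ PySem.Str.join " + " terms,
                     "= " ++ PySem.Str.join " + " (vals.map PySem.Int.toStr)]
       let lines := lines ++ (PySem.List.pyRange 0 (PySem.List.len vals - 1) 1).map (fun j =>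
           "= " ++ PySem.Str.join " + "
             ((PySem.List.pyGetD sums (j + 1) 0 :: PySem.List.slice vals (some (j + 2)) none).map
               PySem.Int.toStr))
       PySem.Str.join "\n" lines ++ "\n\n#### " ++ PySem.Int.toStr (a * b)) := by
  obtain ⟨m, rfl⟩ : ∃ m : Nat, big = (m : Int) := ⟨big.toNat, by omega⟩
  have hm : 0 < m := by exact_mod_cast hbig
  simp only []
  rw [aStep_foldl, coeffs_bridge m hm]
  simp only [List.nil_append, List.length_map]
  by_cases hlen : (bExtract (m : Int) 1).reverse.length ≤ 1
  · rw [if_pos hlen, if_pos hlen]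
  · rw [if_neg hlen, if_neg hlen]
    generalize hC : (bExtract (m : Int) 1).reverse = coeffs at *
    obtain ⟨v, rest, hvr⟩ : ∃ v rest, coeffs.map (fun c => mul * c) = v :: rest := by
      cases coeffs with
      | nil => simp at hlen
      | cons c cs => exact ⟨_, _, rfl⟩
    rw [hvr]
    rw [aWhile_eq]
    congr 1
    rw [sums_foldl, List.nil_append]
    have hlen2 : PySem.List.len (v :: rest) - 1 = ((rest.length : Int)) := by
      rw [PySem.List.len_eq]
      simp only [List.length_cons]
      push_cast
      ring
    rw [hlen2, lines_tail_eq]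
    · cases bol <;> simp

-- ===== VERDICT =====
theorem multiplication_work_py_spec : Claim_equal_multiplication_work_py := by
  intro a b _
  unfold Spec_multiplication_work_py multiplication_work_py multiplication_work_py_alt
  by_cases h1 : min a b < 10 ∨ max a b < 30
  · simp only [h1, if_true]
  · simp only [h1, if_false]
    rw [not_or] at h1; simp only [not_lt] at h1
    by_cases hab : a ≥ b
    · have hbig : 0 < a := by
        have := h1.2
        have : max a b = a := max_eq_left hab
        omega
      simpa only [if_pos hab] using branch_eq a b a b true hbig
    · have hbig : 0 < b := by
        have h2 := h1.2
        have h3 : max a b = b := max_eq_right (le_of_not_ge hab)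
        omega
      simpa only [if_neg hab] using branch_eq a b b a false hbig
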